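-- pv_equiv track=rewrite | github.com/Vottam/hermes-agent | hermes_cli/memory_report.py | _best_next_action
-- ===== SOURCE A (Python) =====
-- from typing import Any
--
-- def _best_next_action(maintain_report: dict[str, Any]) -> str:
--     actions = maintain_report.get("actions", []) if isinstance(maintain_report, dict) else []
--     if not isinstance(actions, list):
--         actions = []
--     best = next((action for action in actions if action.get("severity") == "high"), None)
--     if best is None:
--         best = next((action for action in actions if action.get("proposed_action") != "NOOP"), None)
--     if best:
--         return f"Review {best.get('scope')} proposal for {best.get('target_id')} ({best.get('proposed_action')})"
--     return "No changes needed"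
-- ===== SOURCE B (Python) =====
-- from typing import Any
--
-- def _best_next_action(maintain_report: dict[str, Any]) -> str:
--     actions = maintain_report.get("actions", []) if isinstance(maintain_report, dict) else []
--     if not isinstance(actions, list):
--         actions = []
--     best = None
--     fallback = None
--     for action in actions:
--         if action.get("severity") == "high":
--             best = action
--             break
--         if fallback is None and action.get("proposed_action") != "NOOP":
--             fallback = action
--     if best is None:
--         best = fallback
--     if best:
--         return f"Review {best.get('scope')} proposal for {best.get('target_id')} ({best.get('proposed_action')})"
--     return "No changes needed"
-- ===== Notes on version B (the rewrite author's own statement) =====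
-- stated objective: alternative
-- what changed: Replaced A's two generator scans (next(... severity=='high'), then next(... proposed_action!='NOOP')) by a single explicit loop that breaks on the first high-severity action while recording the first non-NOOP action as a fallback.
import Mathlib
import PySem

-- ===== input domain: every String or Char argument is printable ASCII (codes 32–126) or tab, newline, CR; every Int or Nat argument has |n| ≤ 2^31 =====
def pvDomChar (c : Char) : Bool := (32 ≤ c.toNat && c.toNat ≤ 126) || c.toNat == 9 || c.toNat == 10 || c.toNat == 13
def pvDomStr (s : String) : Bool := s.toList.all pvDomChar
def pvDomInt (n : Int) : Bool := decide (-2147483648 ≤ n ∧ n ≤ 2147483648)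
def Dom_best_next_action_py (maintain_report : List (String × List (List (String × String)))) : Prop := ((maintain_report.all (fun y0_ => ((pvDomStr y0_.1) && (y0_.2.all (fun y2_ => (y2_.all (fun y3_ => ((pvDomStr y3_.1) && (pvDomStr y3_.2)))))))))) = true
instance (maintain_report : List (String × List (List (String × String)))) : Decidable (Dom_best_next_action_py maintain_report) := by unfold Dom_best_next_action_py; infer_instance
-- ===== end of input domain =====

-- B replaces A's two generator scans by a single loop that breaks on the first
-- high-severity action while recording the first non-NOOP action as a fallback
-- (objective: alternative decomposition, same cost).

-- shared dict primitives (both Pythons use the identical .get calls and f-string)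
-- dict.get(k) on a str->str dict: first match in the association list (exact)
def pvAGet (d : List (String × String)) (k : String) : Option String :=
  (d.find? (fun p => p.1 == k)).map (·.2)

-- f-string interpolation of a possibly-None value: str(None) = "None" (exact)
def pvFmt : Option String → String
  | none => "None"
  | some s => s

-- the f-string both Pythons return
def pvMsg (a : List (String × String)) : String :=
  "Review " ++ pvFmt (pvAGet a "scope") ++ " proposal for " ++ pvFmt (pvAGet a "target_id")
    ++ " (" ++ pvFmt (pvAGet a "proposed_action") ++ ")"

-- ===== PORT A =====
def best_next_action_py (maintain_report : List (String × List (List (String × String)))) : String :=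
  -- maintain_report.get("actions", []); the isinstance guards are vacuous under the typed domain
  let actions := ((maintain_report.find? (fun p => p.1 == "actions")).map (·.2)).getD []
  -- next((action for action in actions if action.get("severity") == "high"), None)
  let best := actions.find? (fun a => pvAGet a "severity" == some "high")
  -- if best is None: next((action ... if action.get("proposed_action") != "NOOP"), None)
  let best := match best with
    | none => actions.find? (fun a => pvAGet a "proposed_action" != some "NOOP")
    | some a => some a
  -- "if best:" — a dict is truthy iff nonempty
  match best with
  | some a => if a.isEmpty then "No changes needed" else pvMsg a
  | none => "No changes needed"

-- ===== PORT B =====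
-- the single loop: returns (best-so-far from the high test, first non-NOOP fallback)
def pvLoopB : List (List (String × String)) → Option (List (String × String)) →
    Option (List (String × String)) × Option (List (String × String))
  | [], fb => (none, fb)
  | a :: rest, fb =>
    if pvAGet a "severity" == some "high" then (some a, fb)   -- best = action; break
    else pvLoopB rest
      (if fb.isNone && (pvAGet a "proposed_action" != some "NOOP") then some a else fb)

def best_next_action_py_alt (maintain_report : List (String × List (List (String × String)))) : String :=
  let actions := ((maintain_report.find? (fun p => p.1 == "actions")).map (·.2)).getD []
  let r := pvLoopB actions none
  -- if best is None: best = fallback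
  let best := match r.1 with
    | none => r.2
    | some a => some a
  match best with
  | some a => if a.isEmpty then "No changes needed" else pvMsg a
  | none => "No changes needed"

-- ===== PRECONDITION & SPEC =====
def Spec_best_next_action_py (maintain_report : List (String × List (List (String × String)))) (out : String) : Prop := out = best_next_action_py_alt maintain_report
instance (maintain_report : List (String × List (List (String × String)))) (out : String) : Decidable (Spec_best_next_action_py maintain_report out) := by unfold Spec_best_next_action_py; infer_instance

-- ===== CLAIM (what is proved, stated in full; the proofs are below) =====
def Claim_equal_best_next_action_py : Prop := ∀ (maintain_report : List (String × List (List (String × String)))), Dom_best_next_action_py maintain_report → Spec_best_next_action_py maintain_report (best_next_action_py maintain_report)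

-- ===== LEMMAS AND PROOFS =====

-- the loop computes: first high-severity action, or else the fallback/first non-NOOP action
theorem pvLoopB_spec (acts : List (List (String × String)))
    (fb : Option (List (String × String))) :
    ((pvLoopB acts fb).1.or (pvLoopB acts fb).2) =
      (acts.find? (fun a => pvAGet a "severity" == some "high")).or
        (fb.or (acts.find? (fun a => pvAGet a "proposed_action" != some "NOOP"))) := by
  induction acts generalizing fb with
  | nil => simp [pvLoopB]
  | cons a rest ih =>
    by_cases hs : (pvAGet a "severity" == some "high") = true
    · simp [pvLoopB, hs, List.find?]
    · simp only [Bool.not_eq_true] at hs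
      by_cases hq : (pvAGet a "proposed_action" != some "NOOP") = true
      · cases fb with
        | none => simp [pvLoopB, hs, hq, List.find?, ih]
        | some x => simp [pvLoopB, hs, hq, List.find?, ih]
      · simp only [Bool.not_eq_true] at hq
        simp [pvLoopB, hs, hq, List.find?, ih]

-- ===== VERDICT (by name: the statement is the Claim_ definition above) =====
theorem best_next_action_py_spec : Claim_equal_best_next_action_py := by
  intro mr _
  unfold Spec_best_next_action_py best_next_action_py best_next_action_py_alt
  have h := pvLoopB_spec (((mr.find? (fun p => p.1 == "actions")).map (·.2)).getD []) none
  simp only [Option.none_or] at h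
  cases hA : (((mr.find? (fun p => p.1 == "actions")).map (·.2)).getD []).find?
      (fun a => pvAGet a "severity" == some "high") with
  | some a =>
    rw [hA] at h
    simp only [Option.some_or] at h
    cases hL : (pvLoopB (((mr.find? (fun p => p.1 == "actions")).map (·.2)).getD []) none) with
    | mk b f =>
      rw [hL] at h
      cases b with
      | none => simp at h; simp [hL, hA, h]
      | some b' => simp at h; simp [hL, hA, h]
  | none =>
    rw [hA] at h
    simp only [Option.none_or] at h
    cases hL : (pvLoopB (((mr.find? (fun p => p.1 == "actions")).map (·.2)).getD []) none) with
    | mk b f =>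
      rw [hL] at h
      cases b with
      | none => simp at h; simp [hL, hA, ← h]
      | some b' => simp at h; simp [hL, hA, ← h]
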